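-- pv_equiv track=rewrite | github.com/ma581/coursera_algorithms | test_blah.py | mah
-- ===== SOURCE A (Python) =====
-- import collections
--
-- def mah(maxTravelDist, forwardRouteList, returnRouteList):
--     d = collections.defaultdict(list)
--     for f in forwardRouteList:
--         for r in returnRouteList:
--             d[f[1] + r[1]].append((f[0], r[0]))
--
--     if min(d.keys()) > maxTravelDist:
--         return [()]
--     elif maxTravelDist in d:
--         return d[maxTravelDist]
--     else:
--         best = maxTravelDist
--         while best not in d:
--             best = best - 1
--         return d[best]
-- ===== SOURCE B (Python) =====
-- def mah(maxTravelDist, forwardRouteList, returnRouteList):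
--     # One pass to find the best (largest) combined distance <= maxTravelDist,
--     # then an index of return routes by distance to collect the matching pairs.
--     best = None
--     for _, fd in forwardRouteList:
--         for _, rd in returnRouteList:
--             s = fd + rd
--             if s <= maxTravelDist and (best is None or s > best):
--                 best = s
--     if best is None:
--         return []
--     rindex = {}
--     for rid, rd in returnRouteList:
--         rindex.setdefault(rd, []).append(rid)
--     out = []
--     for fid, fd in forwardRouteList:
--         for rid in rindex.get(best - fd, ()):
--             out.append((fid, rid))
--     return out
-- ===== Notes on version B (the rewrite author's own statement) =====
-- stated objective: faster
-- what changed: A groups every (forward, return) index pair into a defaultdict keyed by combined distance and then decrements from the limit to find the best key; B makes one cheap max-pass to find the best combined distance <= limit, builds a distance index of the return routes only, and collects the matching pairs by lookup.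
-- outside the precondition, e.g. on mah(0, [(1, 5)], [(2, 6)]): A returns [()], B returns []; on mah(5, [], [(2, 6)]): A raises ValueError, B returns []
import Mathlib
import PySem

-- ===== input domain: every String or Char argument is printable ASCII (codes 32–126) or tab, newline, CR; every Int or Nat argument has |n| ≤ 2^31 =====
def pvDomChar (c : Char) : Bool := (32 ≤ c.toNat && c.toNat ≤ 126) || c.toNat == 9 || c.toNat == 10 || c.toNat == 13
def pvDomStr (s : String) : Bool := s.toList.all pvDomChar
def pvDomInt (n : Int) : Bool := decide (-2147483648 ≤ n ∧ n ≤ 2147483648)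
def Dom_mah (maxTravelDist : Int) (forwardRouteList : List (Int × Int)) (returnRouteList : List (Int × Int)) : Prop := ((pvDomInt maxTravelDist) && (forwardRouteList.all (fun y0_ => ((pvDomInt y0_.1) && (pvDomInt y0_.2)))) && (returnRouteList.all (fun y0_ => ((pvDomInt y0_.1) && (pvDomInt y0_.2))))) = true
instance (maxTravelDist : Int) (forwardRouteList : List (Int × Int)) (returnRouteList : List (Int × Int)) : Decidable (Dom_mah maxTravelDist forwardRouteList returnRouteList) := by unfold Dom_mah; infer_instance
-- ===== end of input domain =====

-- B replaces A's dict of ALL index pairs grouped by sum (then a decrementing key search) by a single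
-- max-pass for the best sum ≤ limit plus a distance index over the return routes only.

-- ===== PORT A =====
-- the `while best not in d: best -= 1` loop; the fuel only bounds the number of decrements (chosen large enough under Pre_)
def mahCountdown (d : PySem.Dict Int (List (Int × Int))) : Nat → Int → List (Int × Int)
  | 0, _ => []
  | fuel + 1, best =>
    if d.contains best then d.getD best [] else mahCountdown d fuel (best - 1)

def mah (maxTravelDist : Int) (forwardRouteList : List (Int × Int)) (returnRouteList : List (Int × Int)) : List (Int × Int) :=
  -- d = defaultdict(list); for f in F: for r in R: d[f[1]+r[1]].append((f[0], r[0]))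
  let d := forwardRouteList.foldl
    (fun d f => returnRouteList.foldl
      (fun d r => d.modify (f.2 + r.2) [] (fun l => l ++ [(f.1, r.1)])) d)
    PySem.Dict.empty
  match PySem.List.min? d.keys (fun k => k) with
  | none => []  -- min() on an empty dict raises ValueError: outside Pre_
  | some m =>
    if m > maxTravelDist then []  -- Python returns [()], not a list of pairs: outside Pre_
    else if d.contains maxTravelDist then d.getD maxTravelDist []
    else mahCountdown d ((maxTravelDist - m).toNat + 1) maxTravelDist

-- ===== PORT B =====
def mah_alt (maxTravelDist : Int) (forwardRouteList : List (Int × Int)) (returnRouteList : List (Int × Int)) : List (Int × Int) :=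
  -- best = None; for _, fd in F: for _, rd in R: s = fd + rd; if s <= max and (best is None or s > best): best = s
  let best := forwardRouteList.foldl
    (fun acc f => returnRouteList.foldl
      (fun acc r =>
        if (decide (f.2 + r.2 ≤ maxTravelDist) && (match acc with | none => true | some b => decide (b < f.2 + r.2)))
        then some (f.2 + r.2) else acc) acc)
    none
  match best with
  | none => []
  | some b =>
    -- rindex = {}; for rid, rd in R: rindex.setdefault(rd, []).append(rid)
    let rindex := returnRouteList.foldl
      (fun d r => d.modify r.2 [] (fun l => l ++ [r.1])) PySem.Dict.empty
    -- out = []; for fid, fd in F: for rid in rindex.get(best - fd, ()): out.append((fid, rid))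
    forwardRouteList.foldl
      (fun out f => out ++ (rindex.getD (b - f.2) []).map (fun rid => (f.1, rid))) []

-- ===== PRECONDITION & SPEC =====
-- Pre_ excludes inputs where A raises (min() of an empty dict: either list empty) and inputs where no
-- combined distance fits the limit, on which A returns [()] — a value outside the declared pair-list type.
def Pre_mah (maxTravelDist : Int) (forwardRouteList : List (Int × Int)) (returnRouteList : List (Int × Int)) : Prop :=
  ∃ f ∈ forwardRouteList, ∃ r ∈ returnRouteList, f.2 + r.2 ≤ maxTravelDist
instance (maxTravelDist : Int) (forwardRouteList : List (Int × Int)) (returnRouteList : List (Int × Int)) : Decidable (Pre_mah maxTravelDist forwardRouteList returnRouteList) := by unfold Pre_mah; infer_instance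

def pvWitness_mah : Int × (List (Int × Int)) × (List (Int × Int)) := (10, [(1, 4)], [(2, 5)])

def Spec_mah (maxTravelDist : Int) (forwardRouteList : List (Int × Int)) (returnRouteList : List (Int × Int)) (out : List (Int × Int)) : Prop := out = mah_alt maxTravelDist forwardRouteList returnRouteList
instance (maxTravelDist : Int) (forwardRouteList : List (Int × Int)) (returnRouteList : List (Int × Int)) (out : List (Int × Int)) : Decidable (Spec_mah maxTravelDist forwardRouteList returnRouteList out) := by unfold Spec_mah; infer_instance

-- ===== CLAIM (what is proved, stated in full; the proofs are below) =====
def Claim_equal_mah : Prop := ∀ (maxTravelDist : Int) (forwardRouteList : List (Int × Int)) (returnRouteList : List (Int × Int)), Dom_mah maxTravelDist forwardRouteList returnRouteList → Pre_mah maxTravelDist forwardRouteList returnRouteList → Spec_mah maxTravelDist forwardRouteList returnRouteList (mah maxTravelDist forwardRouteList returnRouteList)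

-- ===== LEMMAS AND PROOFS =====

-- the combined distances of all (forward, return) pairs, and the id pairs matching a given sum,
-- in the traversal order shared by both programs
def pvSums (F R : List (Int × Int)) : List Int := F.flatMap (fun f => R.map (fun r => f.2 + r.2))
def pvPairs (F R : List (Int × Int)) (k : Int) : List (Int × Int) :=
  F.flatMap (fun f => (R.filter (fun r => f.2 + r.2 == k)).map (fun r => (f.1, r.1)))

lemma pv_mem_sums {F R : List (Int × Int)} {k : Int} :
    k ∈ pvSums F R ↔ ∃ f ∈ F, ∃ r ∈ R, f.2 + r.2 = k := by
  simp [pvSums, eq_comm]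

lemma pv_mem_set_update {s : PySem.Set Int} {xs : List Int} {y : Int} :
    y ∈ PySem.Set.update s xs ↔ y ∈ s ∨ y ∈ xs := by
  rw [PySem.Set.update_eq_append_filter]
  simp [PySem.Set.mem_ofList, PySem.Set.contains]
  tauto

lemma pv_inner_getD (R : List (Int × Int)) (f : Int × Int) (d : PySem.Dict Int (List (Int × Int))) (k : Int) :
    (R.foldl (fun d r => d.modify (f.2 + r.2) [] (fun l => l ++ [(f.1, r.1)])) d).getD k []
      = d.getD k [] ++ (R.filter (fun r => f.2 + r.2 == k)).map (fun r => (f.1, r.1)) := by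
  have h := PySem.Dict.getD_foldl_modify_append (l := R.map (fun r => (f.2 + r.2, (f.1, r.1)))) (d := d) (c := k)
  rw [List.foldl_map] at h
  simp only [h, List.filter_map, List.map_map]
  rfl

lemma pv_dictA_getD (F R : List (Int × Int)) :
    ∀ (d : PySem.Dict Int (List (Int × Int))) (k : Int),
      (F.foldl (fun d f => R.foldl
          (fun d r => d.modify (f.2 + r.2) [] (fun l => l ++ [(f.1, r.1)])) d) d).getD k []
      = d.getD k [] ++ pvPairs F R k := by
  induction F with
  | nil => simp [pvPairs]
  | cons f F ih =>
    intro d k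
    simp only [List.foldl_cons, ih, pv_inner_getD, pvPairs, List.flatMap_cons, List.append_assoc]

lemma pv_dictA_keys (F R : List (Int × Int)) :
    ∀ (d : PySem.Dict Int (List (Int × Int))) (k : Int),
      (k ∈ (F.foldl (fun d f => R.foldl
          (fun d r => d.modify (f.2 + r.2) [] (fun l => l ++ [(f.1, r.1)])) d) d).keys
      ↔ k ∈ d.keys ∨ k ∈ pvSums F R) := by
  induction F with
  | nil => simp [pvSums]
  | cons f F ih =>
    intro d k
    have hinner : (R.foldl (fun d r => d.modify (f.2 + r.2) [] (fun l => l ++ [(f.1, r.1)])) d).keys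
        = PySem.Set.update d.keys (R.map (fun r => f.2 + r.2)) :=
      PySem.Dict.keys_foldl_modify_key (l := R) (key := fun r => f.2 + r.2) (d0 := ([] : List (Int × Int))) (f := fun d r l => l ++ [(f.1, r.1)]) (d := d)
    rw [List.foldl_cons, ih, hinner, pv_mem_set_update]
    simp only [pvSums, List.flatMap_cons, List.mem_append, List.mem_map]
    exact or_assoc

lemma pv_rindex_getD (R : List (Int × Int)) (k : Int) :
    (R.foldl (fun d r => d.modify r.2 [] (fun l => l ++ [r.1]))
        (PySem.Dict.empty : PySem.Dict Int (List Int))).getD k []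
      = (R.filter (fun r => r.2 == k)).map (·.1) := by
  have h := PySem.Dict.getD_foldl_modify_append (l := R.map (fun r => (r.2, r.1))) (d := (PySem.Dict.empty : PySem.Dict Int (List Int))) (c := k)
  rw [List.foldl_map] at h
  simp only [h, PySem.Dict.getD_empty, List.nil_append, List.filter_map, List.map_map]
  rfl

-- B's inner loop body, named for the proofs (definitionally the lambda in mah_alt)
def pvBestStep (L : Int) (acc : Option Int) (s : Int) : Option Int :=
  if (decide (s ≤ L) && (match acc with | none => true | some b => decide (b < s))) then some s else acc

lemma pvBestStep_none {L s : Int} (h : s ≤ L) : pvBestStep L none s = some s := by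
  simp [pvBestStep, h]
lemma pvBestStep_gt {L s b : Int} (h : s ≤ L) (h2 : b < s) : pvBestStep L (some b) s = some s := by
  simp [pvBestStep, h, h2]
lemma pvBestStep_keep_gt {L s : Int} (h : ¬ s ≤ L) (acc : Option Int) : pvBestStep L acc s = acc := by
  simp [pvBestStep, h]
lemma pvBestStep_keep_le {L s b : Int} (h2 : ¬ b < s) : pvBestStep L (some b) s = some b := by
  simp [pvBestStep, h2]

-- characterisation of B's running-max fold over a flat list of sums
lemma pv_best_fold (L : Int) :
    ∀ (ss : List Int) (acc : Option Int),
      (ss.foldl (pvBestStep L) acc = none ↔ acc = none ∧ ∀ s ∈ ss, ¬ s ≤ L)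
      ∧ ∀ b, ss.foldl (pvBestStep L) acc = some b →
          (acc = some b ∨ (b ∈ ss ∧ b ≤ L)) ∧ (∀ s ∈ ss, s ≤ L → s ≤ b)
            ∧ (∀ a, acc = some a → a ≤ b) := by
  intro ss
  induction ss with
  | nil =>
    intro acc
    simp only [List.foldl_nil, List.not_mem_nil]
    refine ⟨by simp, fun b hb => ⟨Or.inl hb, by simp, fun a ha => ?_⟩⟩
    rw [ha] at hb; injection hb with h; omega
  | cons s ss ih =>
    intro acc
    simp only [List.foldl_cons, List.mem_cons]
    by_cases hsL : s ≤ L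
    · have hstep : ∃ c, ss.foldl (pvBestStep L) (pvBestStep L acc s) = ss.foldl (pvBestStep L) (some c) ∧ s ≤ c ∧ (∀ a, acc = some a → a ≤ c) ∧ (acc = some c ∨ c = s) := by
        cases acc with
        | none => exact ⟨s, by rw [pvBestStep_none hsL], le_refl s, by simp, Or.inr rfl⟩
        | some a =>
          by_cases hlt : a < s
          · exact ⟨s, by rw [pvBestStep_gt hsL hlt], le_refl s, fun a' ha' => by injection ha'; omega, Or.inr rfl⟩
          · exact ⟨a, by rw [pvBestStep_keep_le hlt], by omega, fun a' ha' => by injection ha'; omega,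
              Or.inl rfl⟩
      obtain ⟨c, hc, hsc, hacc, hcs⟩ := hstep
      rw [hc]
      obtain ⟨ih1, ih2⟩ := ih (some c)
      constructor
      · rw [ih1]
        exact iff_of_false (by simp) (fun h => (h.2 s (Or.inl rfl)) hsL)
      · intro b hb
        obtain ⟨h1, h2, h3⟩ := ih2 b hb
        have hcb : c ≤ b := h3 c rfl
        refine ⟨?_, ?_, fun a ha => le_trans (hacc a ha) hcb⟩
        · rcases h1 with h | h
          · rcases hcs with h' | rfl
            · left; rw [h']; injection h with h; rw [h]
            · right; injection h with h; exact ⟨Or.inl h.symm, by omega⟩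
          · right; exact ⟨Or.inr h.1, h.2⟩
        · intro t ht htL
          rcases ht with rfl | ht
          · omega
          · exact h2 t ht htL
    · rw [pvBestStep_keep_gt hsL]
      obtain ⟨ih1, ih2⟩ := ih acc
      constructor
      · rw [ih1]
        constructor
        · rintro ⟨rfl, h⟩
          exact ⟨rfl, fun t ht => by rcases ht with rfl | ht; exact hsL; exact h t ht⟩
        · rintro ⟨rfl, h⟩
          exact ⟨rfl, fun t ht => h t (Or.inr ht)⟩
      · intro b hb
        obtain ⟨h1, h2, h3⟩ := ih2 b hb
        refine ⟨?_, ?_, h3⟩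
        · rcases h1 with h | h
          · left; exact h
          · right; exact ⟨Or.inr h.1, h.2⟩
        · intro t ht htL
          rcases ht with rfl | ht
          · exact absurd htL hsL
          · exact h2 t ht htL

lemma pv_nested_foldl {α : Type} (F R : List (Int × Int)) (g : α → Int → α) :
    ∀ (init : α), F.foldl (fun a f => R.foldl (fun a r => g a (f.2 + r.2)) a) init
      = (pvSums F R).foldl g init := by
  induction F with
  | nil => intro init; simp [pvSums]
  | cons f F ih =>
    intro init
    simp only [pvSums, List.flatMap_cons, List.foldl_cons, List.foldl_append, List.foldl_map] at *
    rw [ih]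

lemma pv_countdown_spec (d : PySem.Dict Int (List (Int × Int))) (b : Int)
    (hb : d.contains b = true) :
    ∀ (fuel : Nat) (start : Int), b ≤ start →
      (∀ k, b < k → k ≤ start → d.contains k = false) →
      (start - b).toNat < fuel →
      mahCountdown d fuel start = d.getD b [] := by
  intro fuel
  induction fuel with
  | zero => intro start _ _ h; omega
  | succ n ih =>
    intro start hbs hnone hfuel
    rw [mahCountdown]
    by_cases heq : start = b
    · subst heq; rw [if_pos hb]
    · have hlt : b < start := by omega
      rw [if_neg (by simp [hnone start hlt (le_refl start)])]
      exact ih (start - 1) (by omega) (fun k hk1 hk2 => hnone k hk1 (by omega)) (by omega)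

-- B's output for a fixed best sum b is exactly the id pairs matching b, in the shared order
lemma pv_alt_out (F R : List (Int × Int)) (b : Int) :
    (F.foldl (fun out f => out ++
        ((R.foldl (fun d r => d.modify r.2 [] (fun l => l ++ [r.1]))
          (PySem.Dict.empty : PySem.Dict Int (List Int))).getD (b - f.2) []).map
          (fun rid => (f.1, rid))) [])
      = pvPairs F R b := by
  rw [PySem.List.foldl_append_eq_flatMap]
  rw [List.nil_append]
  unfold pvPairs
  apply List.flatMap_congr
  intro f hf
  rw [pv_rindex_getD, List.map_map]
  congr 1
  apply List.filter_congr
  intro r hr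
  rw [Bool.eq_iff_iff]
  simp only [beq_iff_eq]
  omega

-- ===== VERDICT (by name: the statement is the Claim_ definition above) =====
theorem mah_spec : Claim_equal_mah := by
  intro L F R hDom hPre
  obtain ⟨f0, hf0, r0, hr0, hw⟩ := hPre
  have hs0 : f0.2 + r0.2 ∈ pvSums F R := pv_mem_sums.mpr ⟨f0, hf0, r0, hr0, rfl⟩
  -- the built dict
  set dA := F.foldl (fun d f => R.foldl
      (fun d r => d.modify (f.2 + r.2) [] (fun l => l ++ [(f.1, r.1)])) d)
      (PySem.Dict.empty : PySem.Dict Int (List (Int × Int))) with hdA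
  have hgetD : ∀ k, dA.getD k [] = pvPairs F R k := by
    intro k
    rw [hdA, pv_dictA_getD, PySem.Dict.getD_empty, List.nil_append]
  have hkeys : ∀ k, (k ∈ dA.keys ↔ k ∈ pvSums F R) := by
    intro k
    rw [hdA, pv_dictA_keys]
    simp [PySem.Dict.keys_empty]
  have hcont : ∀ k, (dA.contains k = true ↔ k ∈ pvSums F R) := by
    intro k
    rw [PySem.Dict.contains_iff_mem_keys, hkeys]
  -- B's best
  have hbfold : F.foldl
      (fun acc f => R.foldl
        (fun acc r =>
          if (decide (f.2 + r.2 ≤ L) && (match acc with | none => true | some b => decide (b < f.2 + r.2)))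
          then some (f.2 + r.2) else acc) acc)
      (none : Option Int) = (pvSums F R).foldl (pvBestStep L) none :=
    pv_nested_foldl F R (pvBestStep L) none
  obtain ⟨hn, hsome⟩ := pv_best_fold L (pvSums F R) none
  have hnotnone : (pvSums F R).foldl (pvBestStep L) none ≠ none := by
    intro h
    exact (hn.mp h).2 _ hs0 hw
  obtain ⟨b, hb⟩ : ∃ b, (pvSums F R).foldl (pvBestStep L) none = some b := by
    cases h : (pvSums F R).foldl (pvBestStep L) none with
    | none => exact absurd h hnotnone
    | some b => exact ⟨b, rfl⟩
  obtain ⟨hb1, hb2, _⟩ := hsome b hb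
  have hbmem : b ∈ pvSums F R := by
    rcases hb1 with h | h
    · cases h
    · exact h.1
  have hbL : b ≤ L := by
    rcases hb1 with h | h
    · cases h
    · exact h.2
  have hbmax : ∀ s ∈ pvSums F R, s ≤ L → s ≤ b := hb2
  -- B's value
  have hB : mah_alt L F R = pvPairs F R b := by
    show (match F.foldl
      (fun acc f => R.foldl
        (fun acc r =>
          if (decide (f.2 + r.2 ≤ L) && (match acc with | none => true | some b => decide (b < f.2 + r.2)))
          then some (f.2 + r.2) else acc) acc)
      (none : Option Int) with
      | none => []
      | some b => F.foldl (fun out f => out ++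
          ((R.foldl (fun d r => d.modify r.2 [] (fun l => l ++ [r.1]))
            (PySem.Dict.empty : PySem.Dict Int (List Int))).getD (b - f.2) []).map
            (fun rid => (f.1, rid))) []) = pvPairs F R b
    rw [hbfold, hb]
    exact pv_alt_out F R b
  -- A's value
  have hA : mah L F R = pvPairs F R b := by
    show (match PySem.List.min? dA.keys (fun k => k) with
      | none => []
      | some m =>
        if m > L then []
        else if dA.contains L then dA.getD L []
        else mahCountdown dA ((L - m).toNat + 1) L) = pvPairs F R b
    have hkne : dA.keys ≠ [] := by
      intro h
      have := (hkeys (f0.2 + r0.2)).mpr hs0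
      rw [h] at this
      cases this
    obtain ⟨m, hm⟩ : ∃ m, PySem.List.min? dA.keys (fun k => k) = some m := by
      cases h : PySem.List.min? dA.keys (fun k => k) with
      | none => exact absurd ((PySem.List.min?_eq_none_iff _ _).mp h) hkne
      | some m => exact ⟨m, rfl⟩
    rw [hm]
    show (if m > L then []
      else if dA.contains L then dA.getD L []
      else mahCountdown dA ((L - m).toNat + 1) L) = pvPairs F R b
    have hmmin : ∀ k ∈ dA.keys, m ≤ k := PySem.List.min?_isMin hm
    have hmle : m ≤ L := le_trans (hmmin _ ((hkeys _).mpr hs0)) hw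
    rw [if_neg (by omega)]
    have hcontb : dA.contains b = true := (hcont b).mpr hbmem
    by_cases hcL : dA.contains L = true
    · rw [if_pos hcL]
      have hLb : L = b := le_antisymm (hbmax L ((hcont L).mp hcL) (le_refl L)) hbL
      rw [hLb, hgetD]
    · rw [if_neg hcL]
      have hmb : m ≤ b := hmmin b ((hkeys b).mpr hbmem)
      rw [pv_countdown_spec dA b hcontb ((L - m).toNat + 1) L hbL
        (fun k hk1 hk2 => by
          by_contra hc
          have : k ∈ pvSums F R := (hcont k).mp (by
            cases h : dA.contains k
            · exact absurd h hc
            · rfl)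
          have := hbmax k this hk2
          omega)
        (by omega), hgetD]
  rw [Spec_mah, hA, hB]
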